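-- pv_equiv track=rewrite | github.com/feihoo87/QuLab | qulab/visualization/plot_circ.py | table_to_layers
-- ===== SOURCE A (Python) =====
-- def table_to_layers(table):
--     layers = []
--     for q, gates in table.items():
--         for i, gate in enumerate(gates):
--             if len(layers) <= i:
--                 layers.append({})
--             layers[i][q] = gate
--     return layers
-- ===== SOURCE B (Python) =====
-- def table_to_layers(table):
--     n = max((len(gates) for gates in table.values()), default=0)
--     layers = []
--     for i in range(n):
--         layer = {}
--         for q, gates in table.items():
--             if i < len(gates):
--                 layer[q] = gates[i]
--         layers.append(layer)
--     return layers
-- ===== Notes on version B (the rewrite author's own statement) =====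
-- stated objective: alternative
-- what changed: Replaced the qubit-major traversal that grows the layer list on demand (append-when-short plus in-place dict update) by a layer-major pass: compute the number of layers n = max gate-list length up front, then build each layer dict in one scan of the table with a bounds check.
import Mathlib
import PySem

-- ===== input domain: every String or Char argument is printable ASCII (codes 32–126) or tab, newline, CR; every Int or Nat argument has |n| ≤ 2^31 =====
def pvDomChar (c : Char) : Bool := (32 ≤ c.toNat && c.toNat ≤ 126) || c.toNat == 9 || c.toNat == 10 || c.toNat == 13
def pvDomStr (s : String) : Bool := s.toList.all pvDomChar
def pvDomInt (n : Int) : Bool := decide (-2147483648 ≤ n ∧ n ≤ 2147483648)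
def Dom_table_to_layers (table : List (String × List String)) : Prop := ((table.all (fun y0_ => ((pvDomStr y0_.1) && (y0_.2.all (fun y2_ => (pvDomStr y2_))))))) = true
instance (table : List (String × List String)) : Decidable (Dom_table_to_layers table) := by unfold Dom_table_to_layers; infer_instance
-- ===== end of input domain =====

-- B changes the decomposition only (layer-major with a precomputed layer count instead of
-- qubit-major growing the layer list on demand); same cost, same return value.

-- `layers[i][q] = gate` — dict assignment, ported via PySem.Dict (overwrite keeps position)
def pvDictSet (d : List (String × String)) (k v : String) : List (String × String) :=
  ((PySem.Dict.mk d).insert k v).items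

-- ===== PORT A =====
-- inner loop: `for i, gate in enumerate(gates): …`, recursion over gates carrying the index i
def pvInnerA (q : String) : List String → Nat → List (List (String × String)) → List (List (String × String))
  | [], _, layers => layers
  | gate :: gs, i, layers =>
      let layers := if layers.length ≤ i then layers ++ [[]] else layers
      pvInnerA q gs (i + 1) (layers.modify i (fun d => pvDictSet d q gate))

def table_to_layers (table : List (String × List String)) : List (List (String × String)) :=
  table.foldl (fun layers p => pvInnerA p.1 p.2 0 layers) []

-- ===== PORT B =====
def table_to_layers_alt (table : List (String × List String)) : List (List (String × String)) :=
  let n := table.foldl (fun m p => max m p.2.length) 0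
  (List.range n).map (fun i =>
    table.foldl (fun layer p =>
      if i < p.2.length then pvDictSet layer p.1 (p.2.getD i "") else layer) [])

-- ===== PRECONDITION & SPEC =====
def Spec_table_to_layers (table : List (String × List String)) (out : List (List (String × String))) : Prop := out = table_to_layers_alt table
instance (table : List (String × List String)) (out : List (List (String × String))) : Decidable (Spec_table_to_layers table out) := by unfold Spec_table_to_layers; infer_instance

-- ===== CLAIM (what is proved, stated in full; the proofs are below) =====
def Claim_equal_table_to_layers : Prop := ∀ (table : List (String × List String)), Dom_table_to_layers table → Spec_table_to_layers table (table_to_layers table)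

-- ===== LEMMAS AND PROOFS =====

-- characterisation of one pass of A's inner loop, as length + pointwise getD
theorem pvInnerA_char (q : String) (gs : List String) :
    ∀ (i : Nat) (L : List (List (String × String))), i ≤ L.length →
      (pvInnerA q gs i L).length = max L.length (i + gs.length) ∧
      ∀ j, (pvInnerA q gs i L).getD j [] =
        if i ≤ j ∧ j < i + gs.length then pvDictSet (L.getD j []) q (gs.getD (j - i) "")
        else L.getD j [] := by
  induction gs with
  | nil =>
    intro i L hi
    constructor
    · simp only [pvInnerA, List.length_nil]; omega
    · intro j; simp only [pvInnerA, List.length_nil]; rw [if_neg (by omega)]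
  | cons g gs ih =>
    intro i L hi
    set L1 : List (List (String × String)) := if L.length ≤ i then L ++ [[]] else L with hL1
    have hL1len : L1.length = max L.length (i + 1) := by
      rw [hL1]; split <;> simp <;> omega
    have hL1get : ∀ j : Nat, L1[j]?.getD ([] : List (String × String)) = L[j]?.getD [] := by
      intro j
      rw [hL1]; split
      · rename_i h
        rw [List.getElem?_append]
        split
        · rfl
        · rename_i h2
          have hLnone : L[j]? = none := List.getElem?_eq_none (by omega)
          rw [hLnone]
          rcases Nat.lt_or_ge (j - L.length) 1 with h3 | h3
          · have hz : j - L.length = 0 := by omega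
            simp [hz]
          · have : ([([] : List (String × String))])[j - L.length]? = none :=
              List.getElem?_eq_none (by simpa using h3)
            rw [this]
      · rfl
    set L2 := L1.modify i (fun d => pvDictSet d q g) with hL2
    have hL2len : L2.length = max L.length (i + 1) := by
      rw [hL2, List.length_modify, hL1len]
    have hL2get : ∀ j, L2.getD j [] =
        if j = i then pvDictSet (L.getD j []) q g else L.getD j [] := by
      intro j
      rw [hL2]
      simp only [List.getD_eq_getElem?_getD, List.getElem?_modify]
      by_cases hji : j = i
      · have hjlt : j < L1.length := by omega
        have h1j : L1[j]? = some (L1[j]'hjlt) := List.getElem?_eq_getElem hjlt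
        rw [h1j, if_pos hji]
        have hv := hL1get j
        rw [h1j] at hv
        simp only [Option.getD_some] at hv
        simp [hji.symm, hv]
      · have hm : (Option.map (fun a => if i = j then pvDictSet a q g else a) L1[j]?) = L1[j]? := by
          cases L1[j]? <;> simp [Ne.symm hji]
        rw [show ((fun a => if i = j then pvDictSet a q g else a) <$> L1[j]?)
              = (Option.map (fun a => if i = j then pvDictSet a q g else a) L1[j]?) from rfl,
            hm, if_neg hji, hL1get j]
    have hi2 : i + 1 ≤ L2.length := by omega
    obtain ⟨ihlen, ihget⟩ := ih (i + 1) L2 hi2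
    have hstep : pvInnerA q (g :: gs) i L = pvInnerA q gs (i + 1) L2 := by
      rw [pvInnerA]
    constructor
    · rw [hstep, ihlen, hL2len]; simp only [List.length_cons]; omega
    · intro j
      rw [hstep, ihget j]
      by_cases h1 : i + 1 ≤ j ∧ j < i + 1 + gs.length
      · rw [if_pos h1, if_pos (show i ≤ j ∧ j < i + (g :: gs).length by
            simp only [List.length_cons]; omega)]
        rw [hL2get j, if_neg (show ¬ j = i by omega)]
        congr 1
        have hji1 : j - i = (j - (i + 1)) + 1 := by omega
        rw [hji1, List.getD_cons_succ]
      · rw [if_neg h1, hL2get j]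
        by_cases hji : j = i
        · rw [if_pos hji, if_pos (show i ≤ j ∧ j < i + (g :: gs).length by
              simp only [List.length_cons]; omega)]
          rw [hji]
          simp
        · rw [if_neg hji, if_neg (show ¬ (i ≤ j ∧ j < i + (g :: gs).length) by
              simp only [List.length_cons]; omega)]

-- a list is the range-map of its getD
theorem list_eq_range_map_getD (L : List (List (String × String))) :
    L = (List.range L.length).map (fun j => L.getD j []) := by
  apply List.ext_getElem
  · simp
  · intro j h1 h2
    simp [List.getD_eq_getElem?_getD, List.getElem?_eq_getElem (by simpa using h2)]

-- max-fold with a seed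
theorem foldl_max_seed (t : List (String × List String)) :
    ∀ a : Nat, t.foldl (fun m p => max m p.2.length) a
      = max a (t.foldl (fun m p => max m p.2.length) 0) := by
  induction t with
  | nil => intro a; simp [List.foldl]
  | cons p t ih =>
    intro a
    simp only [List.foldl]
    rw [ih (max a p.2.length), ih (max 0 p.2.length)]
    omega

-- main invariant: A's fold from any state L equals the layer-major description
theorem goA_char (t : List (String × List String)) :
    ∀ L : List (List (String × String)),
      t.foldl (fun layers p => pvInnerA p.1 p.2 0 layers) L
        = (List.range (max L.length (t.foldl (fun m p => max m p.2.length) 0))).map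
            (fun j => t.foldl (fun layer p =>
              if j < p.2.length then pvDictSet layer p.1 (p.2.getD j "") else layer)
              (L.getD j [])) := by
  induction t with
  | nil =>
    intro L
    simp only [List.foldl, Nat.max_zero]
    exact list_eq_range_map_getD L
  | cons p t ih =>
    intro L
    obtain ⟨hlen, hget⟩ := pvInnerA_char p.1 p.2 0 L (Nat.zero_le _)
    simp only [List.foldl]
    rw [ih (pvInnerA p.1 p.2 0 L)]
    have hn : max (pvInnerA p.1 p.2 0 L).length (t.foldl (fun m p => max m p.2.length) 0)
        = max L.length (t.foldl (fun m p => max m p.2.length) (max 0 p.2.length)) := by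
      rw [hlen, foldl_max_seed t (max 0 p.2.length)]
      omega
    rw [hn]
    apply List.map_congr_left
    intro j _
    congr 1
    rw [hget j]
    simp only [Nat.zero_le, true_and, Nat.zero_add, Nat.sub_zero]

-- ===== VERDICT (by name: the statement is the Claim_ definition above) =====
theorem table_to_layers_spec : Claim_equal_table_to_layers := by
  intro table _
  unfold Spec_table_to_layers table_to_layers table_to_layers_alt
  rw [goA_char table []]
  simp [List.getD]
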